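-- pv_equiv track=rewrite | github.com/heleownae/AlQuerythm | 050회차/LONGJUMP_BSH.py | solution
-- ===== SOURCE A (Python) =====
-- def solution(n):
--     before = 1
--     defult = 1
--     after = 1
--     for i in range(n-1):
--         if i == 0:
--             before += defult
--         else:
--             before += after
--             after += 1
--     return before % 1234567  # ?
-- ===== SOURCE B (Python) =====
-- def solution(n):
--     # closed form: 1 for n <= 1, else 2 + (n-2)(n-1)/2, taken mod 1234567
--     if n <= 1:
--         return 1
--     return (2 + (n - 2) * (n - 1) // 2) % 1234567
-- ===== Notes on version B (the rewrite author's own statement) =====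
-- stated objective: faster
-- what changed: replaced the O(n) accumulation loop by the closed-form triangular-number formula 2 + (n-2)(n-1)/2 mod 1234567
import Mathlib
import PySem

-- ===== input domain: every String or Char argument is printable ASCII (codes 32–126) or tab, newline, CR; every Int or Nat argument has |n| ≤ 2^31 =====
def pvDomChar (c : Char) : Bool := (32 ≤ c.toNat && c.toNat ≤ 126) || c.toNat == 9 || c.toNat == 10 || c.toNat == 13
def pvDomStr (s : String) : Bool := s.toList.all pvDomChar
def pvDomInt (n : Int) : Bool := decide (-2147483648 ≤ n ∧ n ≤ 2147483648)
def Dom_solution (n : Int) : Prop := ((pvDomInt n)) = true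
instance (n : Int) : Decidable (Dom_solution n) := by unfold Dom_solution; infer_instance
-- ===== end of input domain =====

-- ===== PORT A =====
-- literal port of A: fold over range(n-1) with state (before, after)
def solution (n : Int) : Int :=
  let st := (PySem.List.pyRange 0 (n - 1) 1).foldl
    (fun (st : Int × Int) i =>
      if i = 0 then (st.1 + 1, st.2) else (st.1 + st.2, st.2 + 1)) (1, 1)
  PySem.Int.mod st.1 1234567

-- ===== PORT B =====
-- port of B: closed-form triangular sum (faster: O(1) vs A's O(n) loop)
def solution_alt (n : Int) : Int :=
  if n ≤ 1 then 1
  else PySem.Int.mod (2 + PySem.Int.floordiv ((n - 2) * (n - 1)) 2) 1234567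

-- ===== PRECONDITION & SPEC =====
def Spec_solution (n : Int) (out : Int) : Prop := out = solution_alt n
instance (n : Int) (out : Int) : Decidable (Spec_solution n out) := by unfold Spec_solution; infer_instance

-- ===== CLAIM (what is proved, stated in full; the proofs are below) =====
def Claim_equal_solution : Prop := ∀ (n : Int), Dom_solution n → Spec_solution n (solution n)

-- ===== LEMMAS AND PROOFS =====

-- ===== VERDICT (by name: the statement is the Claim_ definition above) =====
-- tail-loop invariant: starting from (b, a), folding i = 1 .. m-1 adds (m-1) copies of a
-- plus the triangular number (m-1)(m-2)/2 to the accumulator and (m-1) to the counter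
lemma fold_tail (m : Int) (hm : 1 ≤ m) (b a : Int) :
    ((PySem.List.pyRange 1 m 1).foldl
      (fun (st : Int × Int) i =>
        if i = 0 then (st.1 + 1, st.2) else (st.1 + st.2, st.2 + 1)) (b, a))
    = (b + (m - 1) * a + PySem.Int.floordiv ((m - 1) * (m - 2)) 2, a + (m - 1)) := by
  induction m, hm using Int.le_induction generalizing b a with
  | base =>
      simp [PySem.List.pyRange_one_eq_nil (by omega : (1:Int) ≤ 1)]
  | succ m hm ih =>
      rw [PySem.List.pyRange_one_cons (by omega : (1:Int) < m + 1)]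
      simp only [List.foldl_cons, if_neg (by omega : ¬ (1:Int) = 0),
        show (1:Int) + 1 = 2 from by norm_num]
      have h2 : PySem.List.pyRange 2 (m + 1) 1
          = (PySem.List.pyRange 1 m 1).map (fun x => x + 1) := by
        apply List.ext_getElem
        · simp [PySem.List.length_pyRange_one]; omega
        · intro k h₁ h₂
          simp [PySem.List.getElem_pyRange_one] at *
          omega
      -- shift the index range 2..m back to 1..m-1; the body ignores the index except i = 0
      have hcongr : ∀ (init : Int × Int),
          ((PySem.List.pyRange 2 (m + 1) 1).foldl
            (fun (st : Int × Int) i =>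
              if i = 0 then (st.1 + 1, st.2) else (st.1 + st.2, st.2 + 1)) init)
          = ((PySem.List.pyRange 1 m 1).foldl
            (fun (st : Int × Int) i =>
              if i = 0 then (st.1 + 1, st.2) else (st.1 + st.2, st.2 + 1)) init) := by
        intro init
        rw [h2, List.foldl_map]
        apply PySem.List.foldl_congr_mem
        intro st i hi
        have : 1 ≤ i := (PySem.List.mem_pyRange_one.mp hi).1
        simp only [if_neg (by omega : ¬ i + 1 = 0), if_neg (by omega : ¬ i = 0)]
      rw [hcongr, ih]
      -- (m-2)(m-1) is a product of consecutive integers, hence even: divisions are exact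
      obtain ⟨t, ht⟩ := Int.even_mul_succ_self (m - 2)
      have h1 : PySem.Int.floordiv ((m - 1) * (m - 2)) 2 = t := by
        rw [PySem.Int.floordiv_eq_ediv_of_pos (by omega : (0:Int) < 2),
            show (m - 1) * (m - 2) = 2 * t from by linear_combination ht,
            Int.mul_ediv_cancel_left _ (by omega : (2:Int) ≠ 0)]
      have h2' : PySem.Int.floordiv ((m + 1 - 1) * (m + 1 - 2)) 2 = t + (m - 1) := by
        rw [PySem.Int.floordiv_eq_ediv_of_pos (by omega : (0:Int) < 2),
            show (m + 1 - 1) * (m + 1 - 2) = 2 * (t + (m - 1)) from by linear_combination ht,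
            Int.mul_ediv_cancel_left _ (by omega : (2:Int) ≠ 0)]
      rw [h1, h2']
      simp only [Prod.mk.injEq]
      exact ⟨by ring, by ring⟩

theorem solution_spec : Claim_equal_solution := by
  intro n _
  unfold Spec_solution solution solution_alt
  by_cases h : n ≤ 1
  · rw [PySem.List.pyRange_one_eq_nil (by omega : n - 1 ≤ 0)]
    simp [h, PySem.Int.mod]
  · rw [if_neg h, PySem.List.pyRange_one_cons (by omega : (0:Int) < n - 1)]
    simp only [List.foldl_cons, if_true,
      show (0:Int) + 1 = 1 from by norm_num]
    rw [fold_tail (n - 1) (by omega)]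
    have : (1 + 1 + (n - 1 - 1) * 1 + PySem.Int.floordiv ((n - 1 - 1) * (n - 1 - 2)) 2)
        = 2 + PySem.Int.floordiv ((n - 2) * (n - 1)) 2 := by
      rw [PySem.Int.floordiv_eq_ediv_of_pos (by omega : (0:Int) < 2),
          PySem.Int.floordiv_eq_ediv_of_pos (by omega : (0:Int) < 2)]
      obtain ⟨t, ht⟩ := Int.even_mul_succ_self (n - 3)
      rw [show (n - 1 - 1) * (n - 1 - 2) = 2 * t from by linear_combination ht,
          show (n - 2) * (n - 1) = 2 * (t + (n - 2)) from by linear_combination ht,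
          Int.mul_ediv_cancel_left _ (by omega : (2:Int) ≠ 0),
          Int.mul_ediv_cancel_left _ (by omega : (2:Int) ≠ 0)]
      ring
    simp only [this]
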